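-- pv_equiv track=rewrite | github.com/miliar/Code_Jam_Webscraper | Solutions_python/Problem_207/549.py | rep_replace
-- ===== SOURCE A (Python) =====
-- def rep_replace(end, RG_rep, BO_rep, YV_rep):
--     R_f = False
--     B_f = False
--     Y_f = False
--     ret = list()
--     for c in end:
--         if c == 'R' and not R_f:
--             ret.append(RG_rep)
--             R_f = True
--         elif c == 'B' and not B_f:
--             ret.append(BO_rep)
--             B_f = True
--         elif c == 'Y' and not Y_f:
--             ret.append(YV_rep)
--             Y_f = True
--         else:
--             ret.append(c)
--     return "".join(ret)
-- ===== SOURCE B (Python) =====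
-- def rep_replace(end, RG_rep, BO_rep, YV_rep):
--     iR = end.find('R')
--     iB = end.find('B')
--     iY = end.find('Y')
--     out = []
--     for i, c in enumerate(end):
--         if i == iR:
--             out.append(RG_rep)
--         elif i == iB:
--             out.append(BO_rep)
--         elif i == iY:
--             out.append(YV_rep)
--         else:
--             out.append(c)
--     return "".join(out)
-- ===== Notes on version B (the rewrite author's own statement) =====
-- stated objective: alternative
-- what changed: Replaces A's stateful boolean-flag loop (one flag per color tracked while scanning) with precomputing the first-occurrence index of 'R','B','Y' via str.find and then rebuilding the string in one stateless enumerate pass that compares each position against those indices.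
import Mathlib
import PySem

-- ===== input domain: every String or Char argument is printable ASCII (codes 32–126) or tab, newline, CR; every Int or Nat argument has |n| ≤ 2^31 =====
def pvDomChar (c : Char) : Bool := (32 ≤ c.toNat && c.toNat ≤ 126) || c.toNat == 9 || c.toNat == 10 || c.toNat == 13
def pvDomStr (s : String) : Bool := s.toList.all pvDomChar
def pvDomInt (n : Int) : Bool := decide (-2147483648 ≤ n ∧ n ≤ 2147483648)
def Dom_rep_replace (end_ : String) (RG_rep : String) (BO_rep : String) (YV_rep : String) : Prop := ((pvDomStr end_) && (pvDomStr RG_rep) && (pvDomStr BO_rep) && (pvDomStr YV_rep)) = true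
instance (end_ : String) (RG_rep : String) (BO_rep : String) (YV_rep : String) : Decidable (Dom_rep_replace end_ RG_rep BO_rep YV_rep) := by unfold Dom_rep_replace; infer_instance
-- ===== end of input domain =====

-- B replaces A's stateful boolean-flag loop by precomputing the three first-occurrence
-- indices with str.find and rebuilding the string in one stateless enumerate pass
-- (objective: alternative decomposition, same cost).

-- ===== PORT A =====
-- the for-loop of A: state = the three "already replaced" flags; branches in A's order
def pvRepA (RG_rep BO_rep YV_rep : String) : List Char → Bool → Bool → Bool → List String
  | [], _, _, _ => []
  | c :: cs, R_f, B_f, Y_f =>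
    if c = 'R' ∧ R_f = false then RG_rep :: pvRepA RG_rep BO_rep YV_rep cs true B_f Y_f
    else if c = 'B' ∧ B_f = false then BO_rep :: pvRepA RG_rep BO_rep YV_rep cs R_f true Y_f
    else if c = 'Y' ∧ Y_f = false then YV_rep :: pvRepA RG_rep BO_rep YV_rep cs R_f B_f true
    else c.toString :: pvRepA RG_rep BO_rep YV_rep cs R_f B_f Y_f

def rep_replace (end_ : String) (RG_rep : String) (BO_rep : String) (YV_rep : String) : String :=
  PySem.Str.join "" (pvRepA RG_rep BO_rep YV_rep end_.toList false false false)

-- ===== PORT B =====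
def rep_replace_alt (end_ : String) (RG_rep : String) (BO_rep : String) (YV_rep : String) : String :=
  let iR := PySem.Str.find end_ "R"
  let iB := PySem.Str.find end_ "B"
  let iY := PySem.Str.find end_ "Y"
  PySem.Str.join "" ((PySem.List.enumerate end_.toList).foldl
    (fun out ic => out ++
      [if ic.1 = iR then RG_rep else if ic.1 = iB then BO_rep
       else if ic.1 = iY then YV_rep else ic.2.toString]) [])

-- ===== PRECONDITION & SPEC =====
def Spec_rep_replace (end_ : String) (RG_rep : String) (BO_rep : String) (YV_rep : String) (out : String) : Prop := out = rep_replace_alt end_ RG_rep BO_rep YV_rep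
instance (end_ : String) (RG_rep : String) (BO_rep : String) (YV_rep : String) (out : String) : Decidable (Spec_rep_replace end_ RG_rep BO_rep YV_rep out) := by unfold Spec_rep_replace; infer_instance

-- ===== CLAIM (what is proved, stated in full; the proofs are below) =====
def Claim_equal_rep_replace : Prop := ∀ (end_ : String) (RG_rep : String) (BO_rep : String) (YV_rep : String), Dom_rep_replace end_ RG_rep BO_rep YV_rep → Spec_rep_replace end_ RG_rep BO_rep YV_rep (rep_replace end_ RG_rep BO_rep YV_rep)

-- ===== LEMMAS AND PROOFS =====

-- shifting the start counter of find.go by one (singleton needle)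
lemma pvGo_succ (r : Char) : ∀ (t : List Char) (k : Nat),
    PySem.Chars.find.go [r] t (k + 1) =
      if PySem.Chars.find.go [r] t k = -1 then -1 else 1 + PySem.Chars.find.go [r] t k := by
  intro t
  induction t with
  | nil => intro k; simp [PySem.Chars.find.go]
  | cons h t ih =>
    intro k
    simp only [PySem.Chars.find.go]
    by_cases hp : [r].isPrefixOf (h :: t) = true
    · simp [hp]; omega
    · simp [hp, ih (k + 1)]

-- how find with a one-character needle steps over a cons
lemma pvFind_cons (c r : Char) (cs : List Char) :
    PySem.Chars.find (c :: cs) [r] =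
      if c = r then 0
      else if PySem.Chars.find cs [r] = -1 then -1 else 1 + PySem.Chars.find cs [r] := by
  simp only [PySem.Chars.find, PySem.Chars.find.go, List.isPrefixOf]
  by_cases h : c = r
  · simp [h]
  · have : (r == c) = false := by simp [Ne.symm h]
    simp [this, h, pvGo_succ r cs 0]

-- invariant linking one of A's flags to the global first-occurrence index B uses:
-- flag set ⇒ the index is behind position n; flag clear ⇒ the index is find on the suffix, offset by n
def pvGood (f : Bool) (idx : Int) (r : Char) (cs : List Char) (n : Int) : Prop :=
  if f then idx < n
  else idx = (if PySem.Chars.find cs [r] = -1 then -1 else n + PySem.Chars.find cs [r])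

lemma pvGood_head_ne {f : Bool} {idx : Int} {r c : Char} {cs : List Char} {n : Int}
    (h : pvGood f idx r (c :: cs) n) (h0 : 0 ≤ n) (hne : c ≠ r ∨ f = true) : n ≠ idx := by
  cases f with
  | true => simp [pvGood] at h; omega
  | false =>
    have hc : c ≠ r := by rcases hne with h' | h' <;> simp_all
    simp only [pvGood, if_neg (Bool.false_ne_true), pvFind_cons, if_neg hc] at h
    have h1 : -1 ≤ PySem.Chars.find cs [r] := PySem.Chars.neg_one_le_find cs [r]
    by_cases he : PySem.Chars.find cs [r] = -1 <;> simp [he] at h <;> omega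

lemma pvGood_head_eq {idx : Int} {r c : Char} {cs : List Char} {n : Int}
    (h : pvGood false idx r (c :: cs) n) (hc : c = r) : idx = n := by
  simp only [pvGood, if_neg (Bool.false_ne_true), pvFind_cons, if_pos hc] at h
  simp at h; omega

lemma pvGood_tail {f : Bool} {idx : Int} {r c : Char} {cs : List Char} {n : Int}
    (h : pvGood f idx r (c :: cs) n) (hne : c ≠ r ∨ f = true) : pvGood f idx r cs (n + 1) := by
  cases f with
  | true => simp [pvGood] at h ⊢; omega
  | false =>
    have hc : c ≠ r := by rcases hne with h' | h' <;> simp_all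
    simp only [pvGood, if_neg (Bool.false_ne_true), pvFind_cons, if_neg hc] at h ⊢
    have h1 : -1 ≤ PySem.Chars.find cs [r] := PySem.Chars.neg_one_le_find cs [r]
    by_cases he : PySem.Chars.find cs [r] = -1 <;> simp [he] at h ⊢ <;> omega

lemma pvGood_tail_set {idx : Int} {r c : Char} {cs : List Char} {n : Int}
    (h : pvGood false idx r (c :: cs) n) (hc : c = r) : pvGood true idx r cs (n + 1) := by
  have := pvGood_head_eq h hc
  simp [pvGood]; omega

-- A's flag loop produces exactly B's stateless rebuild, for any suffix and offset
lemma pvRepA_eq_map (RG BO YV : String) (iR iB iY : Int) :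
    ∀ (cs : List Char) (n : Int) (rf bf yf : Bool), 0 ≤ n →
      pvGood rf iR 'R' cs n → pvGood bf iB 'B' cs n → pvGood yf iY 'Y' cs n →
      pvRepA RG BO YV cs rf bf yf =
        (PySem.List.enumerate cs n).map
          (fun ic => if ic.1 = iR then RG else if ic.1 = iB then BO
                     else if ic.1 = iY then YV else ic.2.toString) := by
  intro cs
  induction cs with
  | nil => intro n rf bf yf _ _ _ _; simp [pvRepA, PySem.List.enumerate_nil]
  | cons c cs ih =>
    intro n rf bf yf h0 hR hB hY
    rw [PySem.List.enumerate_cons, List.map_cons]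
    by_cases cR : c = 'R' ∧ rf = false
    · rw [pvRepA, if_pos cR]
      have hiR : iR = n := by rw [cR.2] at hR; exact pvGood_head_eq hR cR.1
      have hcB : c ≠ 'B' := by rw [cR.1]; decide
      have hcY : c ≠ 'Y' := by rw [cR.1]; decide
      simp only [if_pos hiR.symm]
      rw [ih (n + 1) true bf yf (by omega)
        (by rw [cR.2] at hR; exact pvGood_tail_set hR cR.1)
        (pvGood_tail hB (Or.inl hcB)) (pvGood_tail hY (Or.inl hcY))]
    · rw [pvRepA, if_neg cR]
      have hnR : n ≠ iR := pvGood_head_ne hR h0 (by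
        by_cases h : c = 'R'
        · right; rcases Bool.eq_false_or_eq_true rf with h' | h' <;> simp_all
        · exact Or.inl h)
      have hGR : pvGood rf iR 'R' cs (n + 1) := pvGood_tail hR (by
        by_cases h : c = 'R'
        · right; rcases Bool.eq_false_or_eq_true rf with h' | h' <;> simp_all
        · exact Or.inl h)
      by_cases cB : c = 'B' ∧ bf = false
      · rw [if_pos cB]
        have hiB : iB = n := by rw [cB.2] at hB; exact pvGood_head_eq hB cB.1
        have hcY : c ≠ 'Y' := by rw [cB.1]; decide
        simp only [if_neg hnR, if_pos hiB.symm]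
        rw [ih (n + 1) rf true yf (by omega) hGR
          (by rw [cB.2] at hB; exact pvGood_tail_set hB cB.1)
          (pvGood_tail hY (Or.inl hcY))]
      · rw [if_neg cB]
        have hnB : n ≠ iB := pvGood_head_ne hB h0 (by
          by_cases h : c = 'B'
          · right; rcases Bool.eq_false_or_eq_true bf with h' | h' <;> simp_all
          · exact Or.inl h)
        have hGB : pvGood bf iB 'B' cs (n + 1) := pvGood_tail hB (by
          by_cases h : c = 'B'
          · right; rcases Bool.eq_false_or_eq_true bf with h' | h' <;> simp_all
          · exact Or.inl h)
        by_cases cY : c = 'Y' ∧ yf = false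
        · rw [if_pos cY]
          have hiY : iY = n := by rw [cY.2] at hY; exact pvGood_head_eq hY cY.1
          simp only [if_neg hnR, if_neg hnB, if_pos hiY.symm]
          rw [ih (n + 1) rf bf true (by omega) hGR hGB
            (by rw [cY.2] at hY; exact pvGood_tail_set hY cY.1)]
        · rw [if_neg cY]
          have hnY : n ≠ iY := pvGood_head_ne hY h0 (by
            by_cases h : c = 'Y'
            · right; rcases Bool.eq_false_or_eq_true yf with h' | h' <;> simp_all
            · exact Or.inl h)
          have hGY : pvGood yf iY 'Y' cs (n + 1) := pvGood_tail hY (by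
            by_cases h : c = 'Y'
            · right; rcases Bool.eq_false_or_eq_true yf with h' | h' <;> simp_all
            · exact Or.inl h)
          simp only [if_neg hnR, if_neg hnB, if_neg hnY]
          rw [ih (n + 1) rf bf yf (by omega) hGR hGB hGY]

lemma pvGood_init (s : String) (r : Char) (rs : String) (hrs : rs.toList = [r]) :
    pvGood false (PySem.Str.find s rs) r s.toList 0 := by
  simp only [pvGood, if_neg (Bool.false_ne_true), PySem.Str.find_eq, hrs]
  by_cases h : PySem.Chars.find s.toList [r] = -1 <;> simp [h]

-- ===== VERDICT (by name: the statement is the Claim_ definition above) =====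
theorem rep_replace_spec : Claim_equal_rep_replace := by
  intro end_ RG_rep BO_rep YV_rep _
  show rep_replace end_ RG_rep BO_rep YV_rep = rep_replace_alt end_ RG_rep BO_rep YV_rep
  unfold rep_replace rep_replace_alt
  dsimp only
  rw [PySem.List.foldl_append_singleton_eq_map]
  congr 1
  exact pvRepA_eq_map RG_rep BO_rep YV_rep _ _ _ end_.toList 0 false false false (le_refl 0)
    (pvGood_init end_ 'R' "R" (by decide)) (pvGood_init end_ 'B' "B" (by decide))
    (pvGood_init end_ 'Y' "Y" (by decide))
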